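-- pv_equiv track=rewrite | github.com/JimmyPesto/nio-smith | plugins/cashup/cashup.py | __simplify_tuple_list
-- ===== SOURCE A (Python) =====
-- def __simplify_tuple_list(tuple_list):
--     simplified_list = []
--     for name1, name2, number in tuple_list:
--         found = False
--         for i, (n1, n2, total) in enumerate(simplified_list):
--             if (name1 == n1 and name2 == n2) or (name1 == n2 and name2 == n1):
--                 simplified_list[i] = (n1, n2, total + number if name1 == n1 else total - number)
--                 found = True
--                 break
--         if not found:
--             simplified_list.append((name1, name2, number))
--     return simplified_list
-- ===== SOURCE B (Python) =====
-- def __simplify_tuple_list(tuple_list):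
--     # Two staged passes: (1) aggregate every amount into a canonical (sorted-pair)
--     # frame of signed totals; (2) re-emit one tuple per unordered pair in order of
--     # first occurrence, converting the canonical total back to that orientation.
--     totals = {}
--     for name1, name2, number in tuple_list:
--         if name1 <= name2:
--             key, signed = (name1, name2), number
--         else:
--             key, signed = (name2, name1), -number
--         totals[key] = totals.get(key, 0) + signed
--     result = []
--     seen = set()
--     for name1, name2, _ in tuple_list:
--         key = (name1, name2) if name1 <= name2 else (name2, name1)
--         if key not in seen:
--             seen.add(key)
--             total = totals[key]
--             result.append((name1, name2, total if name1 <= name2 else -total))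
--     return result
-- ===== Notes on version B (the rewrite author's own statement) =====
-- stated objective: faster
-- what changed: B is restructured into two staged passes instead of A's single pass with a per-tuple scan of the partial result: pass 1 folds every amount into a canonical (lexicographically sorted pair) frame of signed totals, pass 2 walks the input again and emits one tuple per unordered pair at its first occurrence, converting the canonical total back to that orientation; A's O(n) inner scan and its per-match orientation comparison against the stored entry disappear.
import Mathlib
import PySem

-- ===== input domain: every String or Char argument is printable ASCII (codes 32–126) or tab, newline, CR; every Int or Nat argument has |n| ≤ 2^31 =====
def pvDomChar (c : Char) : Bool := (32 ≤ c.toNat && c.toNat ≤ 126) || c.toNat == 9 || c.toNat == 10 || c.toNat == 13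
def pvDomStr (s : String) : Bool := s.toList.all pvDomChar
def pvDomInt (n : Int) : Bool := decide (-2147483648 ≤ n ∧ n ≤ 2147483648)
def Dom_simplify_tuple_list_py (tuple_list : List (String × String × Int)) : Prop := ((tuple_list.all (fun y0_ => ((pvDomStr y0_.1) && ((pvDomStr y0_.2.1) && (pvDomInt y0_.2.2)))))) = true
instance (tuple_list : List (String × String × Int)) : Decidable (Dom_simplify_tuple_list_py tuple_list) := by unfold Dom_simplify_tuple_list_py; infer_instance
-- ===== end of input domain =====

-- B replaces A's quadratic scan-and-update pass by two staged linear passes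
-- (canonical-frame aggregation, then ordered re-emission); same return value.

-- ===== PORT A =====
-- inner `for i, (n1, n2, total) in enumerate(simplified_list): ... break` loop:
-- returns `some` of the updated list when a match was found, `none` otherwise.
def updFirst (name1 name2 : String) (number : Int) :
    List (String × String × Int) → Option (List (String × String × Int))
  | [] => none
  | (n1, n2, total) :: rest =>
    if (name1 = n1 ∧ name2 = n2) ∨ (name1 = n2 ∧ name2 = n1) then
      some ((n1, n2, if name1 = n1 then total + number else total - number) :: rest)
    else
      match updFirst name1 name2 number rest with
      | some rest' => some ((n1, n2, total) :: rest')
      | none => none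

-- body of the outer `for name1, name2, number in tuple_list` loop
def aStep (simplified_list : List (String × String × Int)) (t : String × String × Int) :
    List (String × String × Int) :=
  match updFirst t.1 t.2.1 t.2.2 simplified_list with
  | some l => l                              -- found: entry updated in place
  | none => simplified_list ++ [t]           -- not found: append

def simplify_tuple_list_py (tuple_list : List (String × String × Int)) :
    List (String × String × Int) :=
  tuple_list.foldl aStep []

-- ===== PORT B =====
-- `key = (name1, name2) if name1 <= name2 else (name2, name1)`
def canonKey (a b : String) : String × String := if a ≤ b then (a, b) else (b, a)

-- pass 1 loop body: totals[key] = totals.get(key, 0) + signed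
def pass1Step (totals : PySem.Dict (String × String) Int) (t : String × String × Int) :
    PySem.Dict (String × String) Int :=
  if t.1 ≤ t.2.1 then
    totals.insert (t.1, t.2.1) (totals.getD (t.1, t.2.1) 0 + t.2.2)
  else
    totals.insert (t.2.1, t.1) (totals.getD (t.2.1, t.1) 0 + (-t.2.2))

-- pass 2 loop body, state = (seen, result); `totals[key]` is ported as getD — exact here,
-- because pass 1 inserted every key occurring in tuple_list, so the KeyError branch is unreachable.
def pass2Step (totals : PySem.Dict (String × String) Int)
    (st : PySem.Set (String × String) × List (String × String × Int))
    (t : String × String × Int) :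
    PySem.Set (String × String) × List (String × String × Int) :=
  let key := canonKey t.1 t.2.1
  if st.1.contains key then st
  else
    let total := totals.getD key 0
    (st.1.add key, st.2 ++ [(t.1, t.2.1, if t.1 ≤ t.2.1 then total else -total)])

def simplify_tuple_list_py_alt (tuple_list : List (String × String × Int)) :
    List (String × String × Int) :=
  let totals := tuple_list.foldl pass1Step PySem.Dict.empty
  (tuple_list.foldl (pass2Step totals) (PySem.Set.empty, [])).2

-- ===== PRECONDITION & SPEC =====
def Spec_simplify_tuple_list_py (tuple_list : List (String × String × Int)) (out : List (String × String × Int)) : Prop := out = simplify_tuple_list_py_alt tuple_list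
instance (tuple_list : List (String × String × Int)) (out : List (String × String × Int)) : Decidable (Spec_simplify_tuple_list_py tuple_list out) := by unfold Spec_simplify_tuple_list_py; infer_instance

-- ===== CLAIM (what is proved, stated in full; the proofs are below) =====
def Claim_equal_simplify_tuple_list_py : Prop := ∀ (tuple_list : List (String × String × Int)), Dom_simplify_tuple_list_py tuple_list → Spec_simplify_tuple_list_py tuple_list (simplify_tuple_list_py tuple_list)

-- ===== LEMMAS AND PROOFS =====
-- canonical (unordered) key of a tuple
def kOf (e : String × String × Int) : String × String := canonKey e.1 e.2.1

-- contribution of tuple t to the pair (p, q), signed in the orientation (p, q)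
def signedFor (p q : String) (t : String × String × Int) : Int :=
  if (t.1 = p ∧ t.2.1 = q) ∨ (t.1 = q ∧ t.2.1 = p) then
    (if t.1 = p then t.2.2 else -t.2.2)
  else 0

def sumKey (p q : String) : List (String × String × Int) → Int
  | [] => 0
  | t :: tl => signedFor p q t + sumKey p q tl

-- canonical-frame total of key k (pass 1's frame)
def csum (k : String × String) : List (String × String × Int) → Int
  | [] => 0
  | t :: tl => (if kOf t = k then (if t.1 ≤ t.2.1 then t.2.2 else -t.2.2) else 0) + csum k tl

-- the orientations of the first occurrences of the distinct unordered keys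
def oris : List (String × String × Int) → List (String × String)
  | [] => []
  | t :: tl => (t.1, t.2.1) :: oris (tl.filter (fun u => kOf u != kOf t))
termination_by tl => tl.length
decreasing_by
  have h1 : (tl.attach.filter (fun x => kOf x.1 != kOf t)).length ≤ tl.attach.length :=
    List.length_filter_le _ _
  simpa using h1

theorem oris_nil : oris [] = [] := by rw [oris]

theorem oris_cons (t : String × String × Int) (tl : List (String × String × Int)) :
    oris (t :: tl) = (t.1, t.2.1) :: oris (tl.filter (fun u => kOf u != kOf t)) := by rw [oris]

-- the common functional specification of both programs
def spec (tl : List (String × String × Int)) : List (String × String × Int) :=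
  (oris tl).map (fun pq => (pq.1, pq.2, sumKey pq.1 pq.2 tl))

theorem canonKey_eq_iff (a b c d : String) :
    canonKey a b = canonKey c d ↔ (a = c ∧ b = d) ∨ (a = d ∧ b = c) := by
  unfold canonKey
  split_ifs with h1 h2 h2 <;> simp only [Prod.mk.injEq]
  · constructor
    · rintro ⟨rfl, rfl⟩; exact Or.inl ⟨rfl, rfl⟩
    · rintro (⟨rfl, rfl⟩ | ⟨rfl, rfl⟩)
      · exact ⟨rfl, rfl⟩
      · exact ⟨le_antisymm h1 h2, le_antisymm h2 h1⟩
  · constructor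
    · rintro ⟨rfl, rfl⟩; exact Or.inr ⟨rfl, rfl⟩
    · rintro (⟨rfl, rfl⟩ | ⟨rfl, rfl⟩)
      · exact absurd h1 h2
      · exact ⟨rfl, rfl⟩
  · constructor
    · rintro ⟨rfl, rfl⟩; exact Or.inr ⟨rfl, rfl⟩
    · rintro (⟨rfl, rfl⟩ | ⟨rfl, rfl⟩)
      · exact absurd h2 h1
      · exact ⟨rfl, rfl⟩
  · constructor
    · rintro ⟨rfl, rfl⟩; exact Or.inl ⟨rfl, rfl⟩
    · rintro (⟨rfl, rfl⟩ | ⟨rfl, rfl⟩)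
      · exact ⟨rfl, rfl⟩
      · exact absurd (not_le.mp h1).le h2

-- A's match condition for an entry e is exactly "same canonical key"
theorem match_iff (a b : String) (e : String × String × Int) :
    ((a = e.1 ∧ b = e.2.1) ∨ (a = e.2.1 ∧ b = e.1)) ↔ canonKey a b = kOf e := by
  unfold kOf; rw [canonKey_eq_iff]

theorem signedFor_eq_zero (p q : String) (t : String × String × Int)
    (h : canonKey p q ≠ canonKey t.1 t.2.1) : signedFor p q t = 0 := by
  unfold signedFor
  rw [if_neg]
  intro hc
  apply h
  rw [canonKey_eq_iff]
  rcases hc with ⟨rfl, rfl⟩ | ⟨rfl, rfl⟩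
  · exact Or.inl ⟨rfl, rfl⟩
  · exact Or.inr ⟨rfl, rfl⟩

theorem sumKey_filter (p q : String) (P : (String × String × Int) → Bool)
    (tl : List (String × String × Int))
    (h : ∀ u ∈ tl, P u = false → signedFor p q u = 0) :
    sumKey p q (tl.filter P) = sumKey p q tl := by
  induction tl with
  | nil => rfl
  | cons t tl ih =>
    by_cases ht : P t = true
    · rw [List.filter_cons_of_pos ht, sumKey, sumKey,
        ih (fun u hu => h u (List.mem_cons_of_mem _ hu))]
    · rw [List.filter_cons_of_neg ht, sumKey,
        h t List.mem_cons_self (Bool.eq_false_iff.mpr ht),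
        ih (fun u hu => h u (List.mem_cons_of_mem _ hu)), zero_add]

-- ===== A-side: foldl aStep = spec =====
-- the single matching entry updated in place, as a map
def updBy (a b : String) (x : Int) (e : String × String × Int) : String × String × Int :=
  if kOf e = canonKey a b then (e.1, e.2.1, e.2.2 + signedFor e.1 e.2.1 (a, b, x)) else e

theorem kOf_updBy (a b : String) (x : Int) (e : String × String × Int) :
    kOf (updBy a b x e) = kOf e := by
  unfold updBy; split <;> rfl

theorem updFirst_none_iff (a b : String) (num : Int) (acc : List (String × String × Int)) :
    updFirst a b num acc = none ↔ canonKey a b ∉ acc.map kOf := by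
  induction acc with
  | nil => simp [updFirst]
  | cons e rest ih =>
    obtain ⟨n1, n2, total⟩ := e
    by_cases h : (a = n1 ∧ b = n2) ∨ (a = n2 ∧ b = n1)
    · have hk : canonKey a b = kOf (n1, n2, total) := (match_iff a b (n1, n2, total)).mp h
      simp [updFirst, h, hk]
    · have hk : canonKey a b ≠ kOf (n1, n2, total) := fun hc =>
        h ((match_iff a b (n1, n2, total)).mpr hc)
      simp only [updFirst, if_neg h, List.map_cons, List.mem_cons]
      cases hres : updFirst a b num rest with
      | some r =>
        have hin : canonKey a b ∈ rest.map kOf := by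
          by_contra hn
          rw [ih.mpr hn] at hres
          simp at hres
        simp [hin]
      | none =>
        have hnin := ih.mp hres
        simp [hk, hnin]

theorem updFirst_eq_map (a b : String) (x : Int) (acc : List (String × String × Int))
    (hnd : (acc.map kOf).Nodup) (hin : canonKey a b ∈ acc.map kOf) :
    updFirst a b x acc = some (acc.map (updBy a b x)) := by
  induction acc with
  | nil => simp at hin
  | cons e rest ih =>
    obtain ⟨n1, n2, total⟩ := e
    rw [List.map_cons] at hin hnd
    by_cases h : (a = n1 ∧ b = n2) ∨ (a = n2 ∧ b = n1)
    · have hk : canonKey a b = kOf (n1, n2, total) := (match_iff a b (n1, n2, total)).mp h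
      have hnin : kOf (n1, n2, total) ∉ rest.map kOf := (List.nodup_cons.mp hnd).1
      rw [updFirst, if_pos h, List.map_cons]
      have hrest : rest.map (updBy a b x) = rest := by
        conv_rhs => rw [← List.map_id rest]
        apply List.map_congr_left
        intro u hu
        unfold updBy
        rw [if_neg]
        · rfl
        · intro hc
          exact hnin (by rw [← hk, ← hc]; exact List.mem_map.mpr ⟨u, hu, rfl⟩)
      have hhead : updBy a b x (n1, n2, total)
          = (n1, n2, if a = n1 then total + x else total - x) := by
        unfold updBy
        rw [if_pos hk.symm]
        unfold signedFor
        rw [if_pos (by rcases h with ⟨rfl, rfl⟩ | ⟨rfl, rfl⟩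
                       · exact Or.inl ⟨rfl, rfl⟩
                       · exact Or.inr ⟨rfl, rfl⟩)]
        by_cases ha : a = n1 <;> simp [ha, sub_eq_add_neg]
      rw [hrest, hhead]
    · have hk : canonKey a b ≠ kOf (n1, n2, total) := fun hc =>
        h ((match_iff a b (n1, n2, total)).mpr hc)
      have hin' : canonKey a b ∈ rest.map kOf := by
        rcases List.mem_cons.mp hin with h1 | h1
        · exact absurd h1 hk
        · exact h1
      rw [updFirst, if_neg h, ih (List.Nodup.of_cons hnd) hin', List.map_cons]
      have hhead : updBy a b x (n1, n2, total) = (n1, n2, total) := by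
        unfold updBy; rw [if_neg (fun hc => hk hc.symm)]
      rw [hhead]

-- accumulator entry bumped by the contributions of the remaining input
def bump (tl : List (String × String × Int)) (e : String × String × Int) :
    String × String × Int :=
  (e.1, e.2.1, e.2.2 + sumKey e.1 e.2.1 tl)

-- the part of tl whose keys are not yet represented in the accumulator
def resid (S : List (String × String)) (tl : List (String × String × Int)) :
    List (String × String × Int) :=
  tl.filter (fun u => decide (kOf u ∉ S))

theorem oris_mem (tl : List (String × String × Int)) (pq : String × String)
    (h : pq ∈ oris tl) : ∃ u ∈ tl, pq = (u.1, u.2.1) := by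
  induction tl using oris.induct with
  | case1 => simp [oris_nil] at h
  | case2 t tl ih =>
    simp only [List.unattach_filter, List.unattach_attach] at ih
    rw [oris_cons] at h
    rcases List.mem_cons.mp h with h1 | h1
    · exact ⟨t, List.mem_cons_self, h1⟩
    · obtain ⟨u, hu, hpq⟩ := ih h1
      exact ⟨u, List.mem_cons_of_mem _ (List.mem_of_mem_filter hu), hpq⟩

theorem Arun_eq (tl : List (String × String × Int)) :
    ∀ acc, (acc.map kOf).Nodup →
      tl.foldl aStep acc = acc.map (bump tl) ++ spec (resid (acc.map kOf) tl) := by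
  induction tl with
  | nil =>
    intro acc _
    have hb : acc.map (bump []) = acc := by
      conv_rhs => rw [← List.map_id acc]
      apply List.map_congr_left
      intro e _
      simp [bump, sumKey]
    have hr : resid (acc.map kOf) [] = [] := rfl
    rw [List.foldl_nil, hb, hr]
    rw [show spec [] = [] from by simp [spec, oris_nil]]
    simp
  | cons t tl ih =>
    intro acc hnd
    rw [List.foldl_cons]
    by_cases hmem : canonKey t.1 t.2.1 ∈ acc.map kOf
    · -- key already present: in-place update
      have hstep : aStep acc t = acc.map (updBy t.1 t.2.1 t.2.2) := by
        unfold aStep; rw [updFirst_eq_map _ _ _ acc hnd hmem]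
      have hkeys : (acc.map (updBy t.1 t.2.1 t.2.2)).map kOf = acc.map kOf := by
        rw [List.map_map]
        exact List.map_congr_left (fun e _ => kOf_updBy _ _ _ e)
      rw [hstep, ih _ (by rw [hkeys]; exact hnd), hkeys]
      congr 1
      · rw [List.map_map]
        apply List.map_congr_left
        intro e _
        show bump tl (updBy t.1 t.2.1 t.2.2 e) = bump (t :: tl) e
        by_cases hk : kOf e = canonKey t.1 t.2.1
        · unfold updBy
          rw [if_pos hk]
          show (e.1, e.2.1, e.2.2 + signedFor e.1 e.2.1 (t.1, t.2.1, t.2.2) + sumKey e.1 e.2.1 tl)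
            = (e.1, e.2.1, e.2.2 + sumKey e.1 e.2.1 (t :: tl))
          rw [sumKey, add_assoc]
        · unfold updBy
          rw [if_neg hk]
          show (e.1, e.2.1, e.2.2 + sumKey e.1 e.2.1 tl)
            = (e.1, e.2.1, e.2.2 + sumKey e.1 e.2.1 (t :: tl))
          rw [sumKey, signedFor_eq_zero e.1 e.2.1 t hk, zero_add]
      · unfold resid
        rw [List.filter_cons_of_neg (by simp only [decide_eq_true_eq]; exact not_not_intro hmem)]
    · -- new key: appended
      have hstep : aStep acc t = acc ++ [t] := by
        unfold aStep; rw [(updFirst_none_iff _ _ _ acc).mpr hmem]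
      have hkeys : (acc ++ [t]).map kOf = acc.map kOf ++ [kOf t] := by simp
      have hnd' : ((acc ++ [t]).map kOf).Nodup := by
        rw [hkeys, List.nodup_append]
        refine ⟨hnd, List.nodup_singleton _, fun x hx y hy => ?_⟩
        have hy' : y = kOf t := by simpa using hy
        intro hxy
        rw [hxy, hy'] at hx
        exact hmem hx
      rw [hstep, ih _ hnd', hkeys]
      have hleft : (acc ++ [t]).map (bump tl) = acc.map (bump (t :: tl)) ++ [bump tl t] := by
        rw [List.map_append]
        congr 1
        apply List.map_congr_left
        intro e he
        have hz : signedFor e.1 e.2.1 t = 0 := by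
          apply signedFor_eq_zero
          intro hc
          exact hmem (by rw [← hc]; exact List.mem_map.mpr ⟨e, he, rfl⟩)
        unfold bump
        rw [sumKey, hz, zero_add]
      rw [hleft, List.append_assoc]
      congr 1
      -- right part: [bump tl t] ++ spec (resid (S ++ [kOf t]) tl) = spec (resid S (t :: tl))
      have hresid : resid (acc.map kOf) (t :: tl) = t :: resid (acc.map kOf) tl := by
        unfold resid
        rw [List.filter_cons_of_pos (by exact decide_eq_true hmem)]
      rw [hresid]
      unfold spec
      rw [oris_cons, List.map_cons, List.singleton_append]
      have hM : (resid (acc.map kOf) tl).filter (fun u => kOf u != kOf t)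
          = resid (acc.map kOf ++ [kOf t]) tl := by
        unfold resid
        rw [List.filter_filter]
        apply List.filter_congr
        intro u _
        by_cases h1 : kOf u = kOf t <;> by_cases h2 : kOf u ∈ acc.map kOf <;>
          simp [h1, h2]
      congr 1
      · -- heads agree
        have h1 : signedFor t.1 t.2.1 t = t.2.2 := by
          unfold signedFor
          rw [if_pos (Or.inl ⟨rfl, rfl⟩), if_pos rfl]
        have h2 : sumKey t.1 t.2.1 (resid (acc.map kOf) tl) = sumKey t.1 t.2.1 tl := by
          apply sumKey_filter
          intro u hu hP
          apply signedFor_eq_zero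
          intro hc
          have huS : kOf u ∈ acc.map kOf := by
            by_contra hn
            simp [hn] at hP
          exact hmem (by rw [hc]; exact huS)
        show (t.1, t.2.1, t.2.2 + sumKey t.1 t.2.1 tl)
          = (t.1, t.2.1, sumKey t.1 t.2.1 (t :: resid (acc.map kOf) tl))
        rw [sumKey, h1, h2]
      · -- tails agree
        rw [show (resid (acc.map kOf) tl).filter (fun u => kOf u != kOf t)
              = resid (acc.map kOf ++ [kOf t]) tl from hM]
        apply List.map_congr_left
        intro pq hpq
        obtain ⟨u, hu, rfl⟩ := oris_mem _ _ hpq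
        have hukey : kOf u ∉ acc.map kOf ++ [kOf t] := by
          unfold resid at hu
          exact of_decide_eq_true (List.mem_filter.mp hu).2
        have hune : kOf u ≠ kOf t := fun hc => hukey (by rw [hc]; simp)
        have hstep1 : sumKey u.1 u.2.1 (t :: resid (acc.map kOf) tl)
            = sumKey u.1 u.2.1 (resid (acc.map kOf) tl) := by
          rw [sumKey, signedFor_eq_zero u.1 u.2.1 t hune, zero_add]
        have hstep2 : sumKey u.1 u.2.1 (resid (acc.map kOf ++ [kOf t]) tl)
            = sumKey u.1 u.2.1 (resid (acc.map kOf) tl) := by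
          rw [← hM]
          apply sumKey_filter
          intro w hw hP
          apply signedFor_eq_zero
          intro hc
          have hwk : kOf w = kOf t := by
            by_contra hn
            simp [hn] at hP
          exact hune (by rw [show kOf u = kOf w from hc, hwk])
        rw [hstep1, hstep2]

theorem A_eq_spec (tl : List (String × String × Int)) :
    simplify_tuple_list_py tl = spec tl := by
  have h := Arun_eq tl [] (by simp)
  have hr : resid ([].map kOf) tl = tl := by
    unfold resid
    simp
  rw [hr] at h
  simpa [simplify_tuple_list_py] using h

-- ===== B-side: two passes = spec =====
theorem pass1_getD (tl : List (String × String × Int)) :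
    ∀ (d : PySem.Dict (String × String) Int) (k : String × String),
      (tl.foldl pass1Step d).getD k 0 = d.getD k 0 + csum k tl := by
  induction tl with
  | nil => intro d k; simp [csum]
  | cons t tl ih =>
    intro d k
    rw [List.foldl_cons, csum, ih (pass1Step d t) k]
    by_cases h : t.1 ≤ t.2.1
    · have hps : pass1Step d t = d.insert (t.1, t.2.1) (d.getD (t.1, t.2.1) 0 + t.2.2) := by
        unfold pass1Step; rw [if_pos h]
      have hk : kOf t = (t.1, t.2.1) := by unfold kOf canonKey; rw [if_pos h]
      rw [hps, PySem.Dict.getD_insert, hk]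
      by_cases hke : k = (t.1, t.2.1)
      · rw [if_pos hke, if_pos hke.symm, hke, if_pos h]; ring
      · rw [if_neg hke, if_neg (fun hc => hke hc.symm), zero_add]
    · have hps : pass1Step d t = d.insert (t.2.1, t.1) (d.getD (t.2.1, t.1) 0 + (-t.2.2)) := by
        unfold pass1Step; rw [if_neg h]
      have hk : kOf t = (t.2.1, t.1) := by unfold kOf canonKey; rw [if_neg h]
      rw [hps, PySem.Dict.getD_insert, hk]
      by_cases hke : k = (t.2.1, t.1)
      · rw [if_pos hke, if_pos hke.symm, hke, if_neg h]; ring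
      · rw [if_neg hke, if_neg (fun hc => hke hc.symm), zero_add]

theorem signed_c (p q : String) (t : String × String × Int) :
    signedFor p q t =
      if p ≤ q then (if kOf t = canonKey p q then (if t.1 ≤ t.2.1 then t.2.2 else -t.2.2) else 0)
      else -(if kOf t = canonKey p q then (if t.1 ≤ t.2.1 then t.2.2 else -t.2.2) else 0) := by
  by_cases hk : kOf t = canonKey p q
  · have hcases := (canonKey_eq_iff t.1 t.2.1 p q).mp hk
    rcases hcases with ⟨h1, h2⟩ | ⟨h1, h2⟩
    · -- same orientation
      unfold signedFor
      rw [if_pos (Or.inl ⟨h1, h2⟩), if_pos h1, if_pos hk, h1, h2]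
      by_cases hpq : p ≤ q <;> simp [hpq]
    · -- flipped orientation
      by_cases hqp : p = q
      · unfold signedFor
        rw [if_pos (Or.inr ⟨h1, h2⟩), if_pos (by rw [h1, hqp]), if_pos hk, h1, h2, hqp]
        simp
      · have hne1 : t.1 ≠ p := by rw [h1]; exact Ne.symm hqp
        unfold signedFor
        rw [if_pos (Or.inr ⟨h1, h2⟩), if_neg hne1, if_pos hk, h1, h2]
        by_cases hpq : p ≤ q
        · have hx : ¬ q ≤ p := fun hc => hqp (le_antisymm hpq hc)
          simp [hpq, hx]
        · have hx : q ≤ p := (le_total p q).resolve_left hpq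
          simp [hpq, hx]
  · rw [signedFor_eq_zero p q t (fun hc => hk hc.symm), if_neg hk]
    simp

theorem sumKey_eq_csum (p q : String) (tl : List (String × String × Int)) :
    sumKey p q tl = if p ≤ q then csum (canonKey p q) tl else -(csum (canonKey p q) tl) := by
  induction tl with
  | nil => by_cases hpq : p ≤ q <;> simp [sumKey, csum, hpq]
  | cons t tl ih =>
    rw [sumKey, csum, ih, signed_c p q t]
    by_cases hpq : p ≤ q
    · simp [hpq]
    · simp [hpq]; ring

-- one emitted output entry of pass 2
def emit (totals : PySem.Dict (String × String) Int) (pq : String × String) :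
    String × String × Int :=
  (pq.1, pq.2,
    if pq.1 ≤ pq.2 then totals.getD (canonKey pq.1 pq.2) 0
    else -(totals.getD (canonKey pq.1 pq.2) 0))

-- first-occurrence orientations, skipping keys already seen
def orisSeen (S : PySem.Set (String × String)) :
    List (String × String × Int) → List (String × String)
  | [] => []
  | t :: tl =>
    if S.contains (kOf t) then orisSeen S tl
    else (t.1, t.2.1) :: orisSeen (S.add (kOf t)) tl

theorem pass2_out (totals : PySem.Dict (String × String) Int)
    (tl : List (String × String × Int)) :
    ∀ (S : PySem.Set (String × String)) (out : List (String × String × Int)),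
      (tl.foldl (pass2Step totals) (S, out)).2 = out ++ (orisSeen S tl).map (emit totals) := by
  induction tl with
  | nil => intro S out; simp [orisSeen]
  | cons t tl ih =>
    intro S out
    rw [List.foldl_cons, orisSeen]
    by_cases h : S.contains (canonKey t.1 t.2.1) = true
    · have hps : pass2Step totals (S, out) t = (S, out) := by
        simp only [pass2Step]
        rw [if_pos h]
      rw [hps, if_pos (show S.contains (kOf t) = true from h), ih S out]
    · have hps : pass2Step totals (S, out) t
          = (S.add (kOf t), out ++ [emit totals (t.1, t.2.1)]) := by
        simp only [pass2Step]
        rw [if_neg h]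
        rfl
      rw [hps, if_neg (show ¬ S.contains (kOf t) = true from h), ih, List.map_cons,
        List.append_assoc]
      rfl

theorem orisSeen_eq (tl : List (String × String × Int)) :
    ∀ S : PySem.Set (String × String),
      orisSeen S tl = oris (tl.filter (fun u => decide (kOf u ∉ S))) := by
  induction tl with
  | nil => intro S; rw [List.filter_nil, oris_nil]; rfl
  | cons t tl ih =>
    intro S
    rw [orisSeen]
    by_cases h : S.contains (kOf t)
    · have hmem : kOf t ∈ S := (PySem.Set.contains_iff S (kOf t)).mp h
      rw [if_pos h,
        List.filter_cons_of_neg (by simp only [decide_eq_true_eq]; exact not_not_intro hmem), ih]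
    · have hnmem : kOf t ∉ S := fun hc => h ((PySem.Set.contains_iff S (kOf t)).mpr hc)
      rw [if_neg h, List.filter_cons_of_pos (by exact decide_eq_true hnmem), ih]
      rw [oris_cons]
      congr 1
      rw [List.filter_filter]
      have hfc : tl.filter (fun u => decide (kOf u ∉ S.add (kOf t)))
          = tl.filter (fun a => (kOf a != kOf t) && decide (kOf a ∉ S)) := by
        apply List.filter_congr
        intro u _
        by_cases h1 : kOf u = kOf t <;> by_cases h2 : kOf u ∈ S <;>
          simp [h1, h2, PySem.Set.mem_add]
      rw [hfc]

theorem B_eq_spec (tl : List (String × String × Int)) :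
    simplify_tuple_list_py_alt tl = spec tl := by
  show (tl.foldl (pass2Step (tl.foldl pass1Step PySem.Dict.empty))
      (PySem.Set.empty, [])).2 = spec tl
  rw [pass2_out, orisSeen_eq]
  have hf : tl.filter (fun u => decide (kOf u ∉ (PySem.Set.empty : PySem.Set (String × String)))) = tl := by
    simp [PySem.Set.empty]
  rw [hf, List.nil_append]
  unfold spec
  apply List.map_congr_left
  intro pq _
  unfold emit
  rw [pass1_getD tl PySem.Dict.empty, PySem.Dict.getD_empty, zero_add,
    sumKey_eq_csum pq.1 pq.2 tl]

-- ===== VERDICT (by name: the statement is the Claim_ definition above) =====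
theorem simplify_tuple_list_py_spec : Claim_equal_simplify_tuple_list_py := by
  intro tuple_list _
  unfold Spec_simplify_tuple_list_py
  rw [A_eq_spec, B_eq_spec]
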